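-- pv_equiv track=rewrite | github.com/adzina/funduscopy | stats.py | cut25x25FromArray
-- ===== SOURCE A (Python) =====
-- def cut25x25FromArray(array, coords):
--     """Returns 25x25 square from given array (or less when start point is close to the edge)"""
--     result = []
--     pom = []
--
--     for x in range(coords[0]-12, coords[0]+13):
--         for y in range(coords[1]-12, coords[1]+13):
--             if x >= 0 and y >= 0 and x < len(array) and y < len(array[0]):
--                 pom.append(array[x][y])
--         if pom != []: result.append(pom)
--         pom = []
--
--     return result
-- ===== SOURCE B (Python) =====
-- def cut25x25FromArray(array, coords):
--     """Returns 25x25 square from given array (or less when start point is close to the edge)"""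
--     rows = array[max(0, coords[0]-12):max(0, coords[0]+13)]
--     if not rows:
--         return []
--     y_lo = max(0, coords[1]-12)
--     y_hi = max(0, min(len(array[0]), coords[1]+13))
--     cut = [list(r[y_lo:y_hi]) for r in rows]
--     return [row for row in cut if row]
-- ===== Notes on version B (the rewrite author's own statement) =====
-- stated objective: simpler
-- what changed: B replaces A's 625-iteration double loop with per-element bounds tests by one clamped outer slice of the rows plus one clamped slice per row, then a filter that drops empty rows.
import Mathlib
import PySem

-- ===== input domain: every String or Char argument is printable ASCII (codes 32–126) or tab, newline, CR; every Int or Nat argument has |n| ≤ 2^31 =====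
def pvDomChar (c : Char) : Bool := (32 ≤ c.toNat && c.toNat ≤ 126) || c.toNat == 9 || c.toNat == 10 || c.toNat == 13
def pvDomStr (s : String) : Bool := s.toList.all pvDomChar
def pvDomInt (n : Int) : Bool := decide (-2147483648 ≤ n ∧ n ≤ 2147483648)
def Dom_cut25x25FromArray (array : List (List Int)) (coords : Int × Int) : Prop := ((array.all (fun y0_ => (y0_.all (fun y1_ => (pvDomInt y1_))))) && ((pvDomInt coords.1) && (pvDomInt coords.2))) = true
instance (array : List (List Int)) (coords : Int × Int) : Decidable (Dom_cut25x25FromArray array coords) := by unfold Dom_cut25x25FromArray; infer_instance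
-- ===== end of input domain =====

-- B extracts the window with clamped slices (one outer row slice, one slice per row) instead of
-- A's per-element bounds-tested 25x25 double loop; equivalence is proved wherever A returns.

-- ===== PORT A =====
def cut25x25FromArray (array : List (List Int)) (coords : Int × Int) : List (List Int) :=
  (PySem.List.pyRange (coords.1 - 12) (coords.1 + 13) 1).foldl
    (fun result x =>
      let pom := (PySem.List.pyRange (coords.2 - 12) (coords.2 + 13) 1).foldl
        (fun pom y =>
          if 0 ≤ x ∧ 0 ≤ y ∧ x < (array.length : Int) ∧ y < ((array.headD []).length : Int)
          then pom ++ [(PySem.List.pyGet? ((PySem.List.pyGet? array x).getD []) y).getD 0]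
          else pom) []
      if pom ≠ [] then result ++ [pom] else result) []

-- ===== PORT B =====
def cut25x25FromArray_alt (array : List (List Int)) (coords : Int × Int) : List (List Int) :=
  let rows := PySem.List.slice array (some (max 0 (coords.1 - 12))) (some (max 0 (coords.1 + 13)))
  if rows = [] then []
  else
    let ylo : Int := max 0 (coords.2 - 12)
    let yhi : Int := max 0 (min (((array.headD []).length : Int)) (coords.2 + 13))
    (rows.map (fun r => PySem.List.slice r (some ylo) (some yhi))).filter (fun row => decide (row ≠ []))

-- ===== PRECONDITION & SPEC =====
-- Pre_ excludes exactly the inputs on which A raises IndexError: ragged arrays where some row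
-- inside the x-window is too short for a y-index that lies inside the y-window and below
-- len(array[0]); on every input A returns on, Pre_ holds.
def Pre_cut25x25FromArray (array : List (List Int)) (coords : Int × Int) : Prop :=
  ∀ i < array.length, ∀ j < (array.headD []).length,
    (coords.1 - 12 ≤ (i : Int) ∧ (i : Int) < coords.1 + 13 ∧
     coords.2 - 12 ≤ (j : Int) ∧ (j : Int) < coords.2 + 13) →
    j < (array.getD i []).length
instance (array : List (List Int)) (coords : Int × Int) : Decidable (Pre_cut25x25FromArray array coords) := by unfold Pre_cut25x25FromArray; infer_instance

def pvWitness_cut25x25FromArray : List (List Int) × (Int × Int) := ([[1, 2], [3, 4]], (0, 0))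

def Spec_cut25x25FromArray (array : List (List Int)) (coords : Int × Int) (out : List (List Int)) : Prop := out = cut25x25FromArray_alt array coords
instance (array : List (List Int)) (coords : Int × Int) (out : List (List Int)) : Decidable (Spec_cut25x25FromArray array coords out) := by unfold Spec_cut25x25FromArray; infer_instance

-- ===== CLAIM (what is proved, stated in full; the proofs are below) =====
def Claim_equal_cut25x25FromArray : Prop := ∀ (array : List (List Int)) (coords : Int × Int), Dom_cut25x25FromArray array coords → Pre_cut25x25FromArray array coords → Spec_cut25x25FromArray array coords (cut25x25FromArray array coords)

-- ===== LEMMAS AND PROOFS =====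

theorem pv_foldl_outer (f : Int → List Int) (l : List Int) (init : List (List Int)) :
    l.foldl (fun result x =>
        let pom := f x
        if pom ≠ [] then result ++ [pom] else result) init
      = init ++ (l.map f).filter (fun v => decide (v ≠ [])) := by
  induction l generalizing init with
  | nil => simp
  | cons a l ih =>
    simp only [List.foldl_cons]
    rw [ih]
    by_cases h : f a = [] <;> simp [h]

theorem pv_foldl_inner (P : Int → Prop) [DecidablePred P] (g : Int → Int) (l : List Int) (init : List Int) :
    l.foldl (fun pom y => if P y then pom ++ [g y] else pom) init
      = init ++ (l.filter (fun y => decide (P y))).map g := by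
  induction l generalizing init with
  | nil => simp
  | cons a l ih =>
    simp only [List.foldl_cons]
    rw [ih]
    by_cases h : P a <;> simp [h]

theorem pv_filter_range_aux (c : Int) (k : Nat) : ∀ (a b : Int), (b - a).toNat ≤ k →
    (PySem.List.pyRange a b 1).filter (fun y => decide (0 ≤ y ∧ y < c))
      = PySem.List.pyRange (max 0 a) (min c b) 1 := by
  induction k with
  | zero =>
    intro a b h
    rw [PySem.List.pyRange_one_eq_nil (by omega : b ≤ a),
        PySem.List.pyRange_one_eq_nil (by omega : min c b ≤ max 0 a)]
    rfl
  | succ k ih =>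
    intro a b h
    by_cases hab : b ≤ a
    · rw [PySem.List.pyRange_one_eq_nil hab,
          PySem.List.pyRange_one_eq_nil (by omega : min c b ≤ max 0 a)]
      rfl
    · rw [PySem.List.pyRange_one_cons (by omega : a < b), List.filter_cons]
      by_cases hc : 0 ≤ a ∧ a < c
      · have h1 : max 0 a = a := by omega
        have h2 : a < min c b := by omega
        have h3 : max 0 (a + 1) = a + 1 := by omega
        rw [ih (a + 1) b (by omega)]
        simp [hc, h3, PySem.List.pyRange_one_cons h2]
      · rw [ih (a + 1) b (by omega)]
        by_cases ha : 0 ≤ a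
        · have hac : c ≤ a := by omega
          simp only [hc, decide_false]
          rw [PySem.List.pyRange_one_eq_nil (by omega : min c b ≤ max 0 (a + 1)),
              PySem.List.pyRange_one_eq_nil (by omega : min c b ≤ max 0 a)]
          simp
        · have h1 : max 0 a = 0 := by omega
          have h2 : max 0 (a + 1) = 0 := by omega
          simp [hc, h1, h2]

theorem pv_filter_range (a b c : Int) :
    (PySem.List.pyRange a b 1).filter (fun y => decide (0 ≤ y ∧ y < c))
      = PySem.List.pyRange (max 0 a) (min c b) 1 :=
  pv_filter_range_aux c (b - a).toNat a b le_rfl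

theorem pv_map_slice (row : List Int) (a b : Int) (ha : 0 ≤ a) (hb0 : 0 ≤ b)
    (hb : b ≤ (row.length : Int)) :
    (PySem.List.pyRange a b 1).map (fun y => (PySem.List.pyGet? row y).getD 0)
      = PySem.List.slice row (some a) (some b) := by
  rw [PySem.List.slice_toNat row ha hb0]
  apply List.ext_getElem
  · simp [PySem.List.length_pyRange_one]
    omega
  · intro k hk1 hk2
    simp only [List.getElem_map, PySem.List.getElem_pyRange_one]
    have hlen : k < (b - a).toNat := by
      simpa [PySem.List.length_pyRange_one] using hk1
    have hbound : a + (k : Int) < (row.length : Int) := by omega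
    rw [PySem.List.pyGet?_eq_some_getElem row (by omega) hbound]
    simp only [Option.getD_some, List.getElem_take, List.getElem_drop]
    congr 1
    omega

theorem pv_drop_empty (f : Int → List Int) (p : Int → Bool) (l : List Int)
    (h : ∀ x ∈ l, p x = false → f x = []) :
    (l.map f).filter (fun v => decide (v ≠ []))
      = ((l.filter p).map f).filter (fun v => decide (v ≠ [])) := by
  induction l with
  | nil => rfl
  | cons a l ih =>
    have ih' := ih (fun x hx => h x (List.mem_cons_of_mem a hx))
    by_cases pa : p a = true
    · have hfp : List.filter p (a :: l) = a :: List.filter p l := by simp [pa]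
      rw [hfp, List.map_cons, List.map_cons, List.filter_cons, List.filter_cons, ih']
    · have hfa : f a = [] := h a (List.mem_cons_self) (by simpa using pa)
      have hfp : List.filter p (a :: l) = List.filter p l := by simp [pa]
      rw [hfp, List.map_cons, List.filter_cons, hfa, if_neg (by simp), ih']

def pvPom (array : List (List Int)) (coords : Int × Int) (x : Int) : List Int :=
  (PySem.List.pyRange (coords.2 - 12) (coords.2 + 13) 1).foldl
    (fun pom y =>
      if 0 ≤ x ∧ 0 ≤ y ∧ x < (array.length : Int) ∧ y < ((array.headD []).length : Int)
      then pom ++ [(PySem.List.pyGet? ((PySem.List.pyGet? array x).getD []) y).getD 0]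
      else pom) []

theorem pv_pom_empty (array : List (List Int)) (coords : Int × Int) (x : Int)
    (hx : ¬ (0 ≤ x ∧ x < (array.length : Int))) : pvPom array coords x = [] := by
  have h := pv_foldl_inner
      (fun y => 0 ≤ x ∧ 0 ≤ y ∧ x < (array.length : Int) ∧ y < ((array.headD []).length : Int))
      (fun y => (PySem.List.pyGet? ((PySem.List.pyGet? array x).getD []) y).getD 0)
      (PySem.List.pyRange (coords.2 - 12) (coords.2 + 13) 1) []
  rw [pvPom, h, List.nil_append, List.filter_eq_nil_iff.mpr, List.map_nil]
  intro y _
  simp only [decide_eq_true_eq]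
  tauto

theorem pv_pom_eq (array : List (List Int)) (coords : Int × Int)
    (hPre : Pre_cut25x25FromArray array coords) (x : Int)
    (hx0 : 0 ≤ x) (hxn : x < (array.length : Int))
    (hxl : coords.1 - 12 ≤ x) (hxr : x < coords.1 + 13) :
    pvPom array coords x
      = PySem.List.slice ((PySem.List.pyGet? array x).getD [])
          (some (max 0 (coords.2 - 12)))
          (some (max 0 (min (((array.headD []).length : Int)) (coords.2 + 13)))) := by
  have h := pv_foldl_inner
      (fun y => 0 ≤ x ∧ 0 ≤ y ∧ x < (array.length : Int) ∧ y < ((array.headD []).length : Int))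
      (fun y => (PySem.List.pyGet? ((PySem.List.pyGet? array x).getD []) y).getD 0)
      (PySem.List.pyRange (coords.2 - 12) (coords.2 + 13) 1) []
  rw [pvPom, h, List.nil_append]
  rw [List.filter_congr (q := fun y => decide (0 ≤ y ∧ y < ((array.headD []).length : Int)))
      (by intro y _; simp only [decide_eq_decide]; constructor <;> (intro hy; tauto))]
  rw [pv_filter_range]
  -- the row and its length bound from Pre_
  have hrow : (PySem.List.pyGet? array x).getD [] = array.getD x.toNat [] := by
    rw [PySem.List.pyGet?_of_nonneg array hx0, List.getD_eq_getElem?_getD]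
  set m : Int := ((array.headD []).length : Int) with hm
  set ylo : Int := max 0 (coords.2 - 12) with hylo
  by_cases hwin : ylo < min m (coords.2 + 13)
  · -- nonempty y-window: Pre_ bounds the row length
    have hjm : (min m (coords.2 + 13) - 1).toNat < (array.headD []).length := by omega
    have hlen := hPre x.toNat (by omega) (min m (coords.2 + 13) - 1).toNat hjm
      ⟨by omega, by omega, by omega, by omega⟩
    have hrl : min m (coords.2 + 13) ≤ (((PySem.List.pyGet? array x).getD []).length : Int) := by
      rw [hrow]; omega
    have hmaxeq : max 0 (min m (coords.2 + 13)) = min m (coords.2 + 13) := by omega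
    rw [hmaxeq]
    exact pv_map_slice _ ylo _ (by omega) (by omega) hrl
  · -- empty y-window: both sides are []
    rw [PySem.List.pyRange_one_eq_nil (by omega), List.map_nil]
    rw [PySem.List.slice_toNat ((PySem.List.pyGet? array x).getD []) (by omega) (by omega)]
    have : (max 0 (min m (coords.2 + 13))).toNat - ylo.toNat = 0 := by omega
    rw [this]
    simp

-- ===== VERDICT (by name: the statement is the Claim_ definition above) =====
theorem cut25x25FromArray_spec : Claim_equal_cut25x25FromArray := by
  intro array coords _ hPre
  unfold Spec_cut25x25FromArray
  have hA : cut25x25FromArray array coords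
      = ((PySem.List.pyRange (coords.1 - 12) (coords.1 + 13) 1).map (pvPom array coords)).filter
          (fun v => decide (v ≠ [])) :=
    (pv_foldl_outer (pvPom array coords) _ []).trans (List.nil_append _)
  rw [hA,
      pv_drop_empty (pvPom array coords) (fun x => decide (0 ≤ x ∧ x < (array.length : Int))) _
        (by intro x _ hx; exact pv_pom_empty array coords x (by simpa using hx)),
      pv_filter_range]
  have hmid : (PySem.List.pyRange (max 0 (coords.1 - 12)) (min ((array.length : Int)) (coords.1 + 13)) 1).map (pvPom array coords)
      = (PySem.List.slice array (some (max 0 (coords.1 - 12))) (some (max 0 (coords.1 + 13)))).map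
          (fun r => PySem.List.slice r (some (max 0 (coords.2 - 12)))
            (some (max 0 (min (((array.headD []).length : Int)) (coords.2 + 13))))) := by
    rw [PySem.List.slice_toNat array (by omega) (by omega)]
    apply List.ext_getElem
    · simp [PySem.List.length_pyRange_one]
      omega
    · intro k hk1 hk2
      have hlen : k < ((min ((array.length : Int)) (coords.1 + 13)) - max 0 (coords.1 - 12)).toNat := by
        simpa [PySem.List.length_pyRange_one] using hk1
      simp only [List.getElem_map, PySem.List.getElem_pyRange_one, List.getElem_take,
        List.getElem_drop]
      rw [pv_pom_eq array coords hPre _ (by omega) (by omega) (by omega) (by omega)]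
      congr 2
      rw [PySem.List.pyGet?_eq_some_getElem array (by omega) (by omega), Option.getD_some]
      congr 1
      omega
  rw [hmid]
  unfold cut25x25FromArray_alt
  by_cases hrows : PySem.List.slice array (some (max 0 (coords.1 - 12))) (some (max 0 (coords.1 + 13))) = []
  · simp [hrows]
  · simp [hrows]
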